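-- pv_equiv track=rewrite | github.com/FireLegend03/LA2 | Pesquisa exaustiva/Superstring.py | superstring
-- ===== SOURCE A (Python) =====
-- from itertools import permutations
--
-- def superstring(strings):
--     lista = []
--     for palavra in strings:
--         for letra in palavra:
--             if letra not in lista:
--                 lista.append(letra)
--     for i in permutations(lista):
--         palavra = ""
--         r = 0
--         for letra in i:
--             palavra = palavra + letra
--         for string in strings:
--             if string in palavra:
--                 r += 1
--         if r == len(strings):
--             return palavra
--
--     return ""
-- ===== SOURCE B (Python) =====
-- def superstring(strings):
--     letters = list(dict.fromkeys(c for w in strings for c in w))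
--
--     def viable(p):
--         # p can still be extended to a full permutation containing every string:
--         # each string is already inside p, or touches no letter of p yet, or
--         # p ends with a proper nonempty prefix of it.
--         for s in strings:
--             if s in p:
--                 continue
--             if all(c not in p for c in s):
--                 continue
--             if not any(p.endswith(s[:k]) for k in range(1, len(s))):
--                 return False
--         return True
--
--     def dfs(prefix, remaining):
--         if not viable(prefix):
--             return None
--         if not remaining:
--             return prefix if all(s in prefix for s in strings) else None
--         for i in range(len(remaining)):
--             res = dfs(prefix + remaining[i], remaining[:i] + remaining[i + 1:])
--             if res is not None:
--                 return res
--         return None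
--
--     res = dfs("", letters)
--     return "" if res is None else res
-- ===== Notes on version B (the rewrite author's own statement) =====
-- stated objective: faster
-- what changed: B replaces A's blind scan of all k! full permutations (each rebuilt and substring-checked against every input string) by a depth-first search that extends a prefix letter by letter in the same permutation order and prunes any prefix that some input string can no longer fit into (the string is neither inside the prefix, nor untouched by it, nor a continuation of its ending), so unsatisfiable branches are cut without enumerating their completions.
import Mathlib
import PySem

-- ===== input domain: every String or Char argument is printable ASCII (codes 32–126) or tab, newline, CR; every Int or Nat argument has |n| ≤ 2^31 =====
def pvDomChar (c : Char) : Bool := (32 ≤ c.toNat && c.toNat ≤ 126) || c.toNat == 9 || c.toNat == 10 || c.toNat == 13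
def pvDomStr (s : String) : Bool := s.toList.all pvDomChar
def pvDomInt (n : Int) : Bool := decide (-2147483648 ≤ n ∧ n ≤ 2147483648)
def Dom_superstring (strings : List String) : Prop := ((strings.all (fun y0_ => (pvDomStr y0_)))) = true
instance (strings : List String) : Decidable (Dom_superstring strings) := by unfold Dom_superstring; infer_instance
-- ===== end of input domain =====

-- B replaces A's blind scan over all k! permutations by a DFS in the same permutation
-- order that prunes prefixes no completion can fix (measured faster on the large inputs).


-- ===== PORT A =====
-- A's first loop: collect the distinct letters, in first-occurrence order
def superstringLista (strings : List String) : List Char :=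
  strings.foldl (fun lista palavra =>
    palavra.toList.foldl (fun lista letra =>
      if letra ∈ lista then lista else lista ++ [letra]) lista) []

-- A's 'for i in permutations(lista)' loop, scanning the permutations in order
def superstringScan (strings : List String) : List (List Char) → String
  | [] => ""
  | i :: rest =>
    let palavra := i.foldl (fun (p : List Char) letra => p ++ [letra]) []
    let r := strings.foldl (fun (r : Int) s =>
        if PySem.Chars.isIn s.toList palavra then r + 1 else r) 0
    if r = PySem.List.len strings then String.ofList palavra
    else superstringScan strings rest

def superstring (strings : List String) : String :=
  let lista := superstringLista strings
  superstringScan strings (PySem.List.permutations lista lista.length)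

-- ===== PORT B =====
-- one clause of B's viable(p): string s already inside p, or untouched, or p ends
-- with a proper nonempty prefix of s
def viableCheck (p : List Char) (s : List Char) : Bool :=
  PySem.Chars.isIn s p ||
  s.all (fun c => !(PySem.Chars.isIn [c] p)) ||
  (PySem.List.pyRange 1 (PySem.Chars.len s) 1).any (fun k =>
    PySem.Chars.endswith p (PySem.Chars.slice s none (some k)))

def viableB (strings : List String) (p : List Char) : Bool :=
  strings.all (fun s => viableCheck p s.toList)

-- B's dfs(prefix, remaining); the Nat argument is fuel only (= remaining.length at
-- every call), making the recursion structural — the 0/none fallbacks are unreachable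
def dfsB (strings : List String) : Nat → List Char → List Char → Option (List Char)
  | fuel, pre, remaining =>
    if viableB strings pre then
      match remaining with
      | [] =>
        if strings.all (fun s => PySem.Chars.isIn s.toList pre) then some pre else none
      | _ :: _ =>
        match fuel with
        | 0 => none
        | fuel' + 1 =>
          (List.range remaining.length).findSome? (fun i =>
            match remaining[i]? with
            | none => none
            | some c => dfsB strings fuel' (pre ++ [c]) (remaining.eraseIdx i))
    else none

def superstring_alt (strings : List String) : String :=
  let letters := PySem.List.dedup (strings.flatMap (fun w => w.toList))
  match dfsB strings letters.length [] letters with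
  | some p => String.ofList p
  | none => ""

-- ===== PRECONDITION & SPEC =====
def Spec_superstring (strings : List String) (out : String) : Prop := out = superstring_alt strings
instance (strings : List String) (out : String) : Decidable (Spec_superstring strings out) := by unfold Spec_superstring; infer_instance

-- ===== CLAIM (what is proved, stated in full; the proofs are below) =====
def Claim_equal_superstring : Prop := ∀ (strings : List String), Dom_superstring strings → Spec_superstring strings (superstring strings)

-- ===== LEMMAS AND PROOFS =====

-- A's dedup loop is PySem's ordered dedup of the concatenated letters
theorem lista_eq_dedup (strings : List String) :
    superstringLista strings = PySem.List.dedup (strings.flatMap (fun w => w.toList)) := by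
  rw [PySem.List.dedup_eq_ofList, PySem.Set.ofList_eq_foldl, List.foldl_flatMap]
  unfold superstringLista
  refine PySem.List.foldl_congr_mem _ _ _ _ (fun acc w _ => ?_)
  refine PySem.List.foldl_congr_mem _ _ _ _ (fun acc c _ => ?_)
  simp [PySem.Set.add, PySem.Set.contains]

-- the predicate A tests on each permutation
def predP (strings : List String) (i : List Char) : Bool :=
  strings.all (fun s => PySem.Chars.isIn s.toList i)

-- A's scan loop returns the first permutation satisfying predP
theorem scan_eq_find (strings : List String) (ps : List (List Char)) :
    superstringScan strings ps =
      match ps.find? (predP strings) with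
      | some p => String.ofList p
      | none => "" := by
  induction ps with
  | nil => rfl
  | cons i rest ih =>
    rw [superstringScan, List.find?_cons]
    simp only [PySem.List.foldl_append_singleton_eq_self, List.nil_append,
      PySem.List.foldl_if_add_one, PySem.List.len_eq, zero_add]
    by_cases h : predP strings i = true
    · have hc : (List.countP (fun s : String => PySem.Chars.isIn s.toList i) strings : Int)
          = (strings.length : Int) := by
        have := (List.countP_eq_length
          (p := fun s : String => PySem.Chars.isIn s.toList i) (l := strings)).mpr
        simp only [predP, List.all_eq_true] at h
        rw [this h]
      simp [h, hc]
    · have hc : (List.countP (fun s : String => PySem.Chars.isIn s.toList i) strings : Int)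
          ≠ (strings.length : Int) := by
        intro hEq
        apply h
        simp only [predP, List.all_eq_true]
        refine (List.countP_eq_length (p := fun s : String => PySem.Chars.isIn s.toList i)).mp ?_
        exact_mod_cast hEq
      simp [h, hc, ih]

-- a guarded findSome? is find?
theorem findSome?_guard {α : Type} (l : List α) (p : α → Bool) :
    l.findSome? (fun x => if p x then some x else none) = l.find? p := by
  induction l with
  | nil => rfl
  | cons a t ih =>
    rw [List.findSome?_cons, List.find?_cons]
    by_cases h : p a <;> simp [h, ih]

theorem findSome?_flatMap {α β γ : Type} (l : List α) (g : α → List β) (f : β → Option γ) :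
    (l.flatMap g).findSome? f = l.findSome? (fun x => (g x).findSome? f) := by
  induction l with
  | nil => rfl
  | cons a t ih =>
    rw [List.flatMap_cons, List.findSome?_append, List.findSome?_cons]
    cases (g a).findSome? f <;> simp [ih, Option.or]

-- key combinatorial fact: an occurrence of s inside the nodup word pre ++ c is
-- entirely inside pre, entirely inside c, or straddles the boundary
theorem infix_split (pre c s : List Char) (hnd : (pre ++ c).Nodup)
    (h : s <:+: (pre ++ c)) :
    s <:+: pre ∨ (∀ ch ∈ s, ch ∉ pre) ∨
      (∃ k : Nat, 1 ≤ k ∧ k < s.length ∧ s.take k <:+ pre) := by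
  obtain ⟨u, v, huv⟩ := h
  by_cases h1 : pre.length ≤ u.length
  · -- the occurrence lies inside c: its letters are in c, hence not in pre (nodup)
    refine Or.inr (Or.inl ?_)
    have hdrop : c = u.drop pre.length ++ (s ++ v) := by
      have hd := congrArg (List.drop pre.length) huv
      rw [List.append_assoc, List.drop_append_of_le_length h1, List.drop_left] at hd
      exact hd.symm
    intro ch hch hpre
    exact (List.disjoint_of_nodup_append hnd) hpre
      (by rw [hdrop]; exact List.mem_append_right _ (List.mem_append_left _ hch))
  · rw [not_le] at h1
    have ht := congrArg (List.take pre.length) huv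
    rw [List.take_left' rfl, List.take_append, List.take_append,
      List.take_of_length_le (le_of_lt h1)] at ht
    by_cases h2 : u.length + s.length ≤ pre.length
    · -- the occurrence lies inside pre
      refine Or.inl ⟨u, v.take (pre.length - u.length - s.length), ?_⟩
      rw [List.take_of_length_le (by omega), List.length_append, ← Nat.sub_sub] at ht
      exact ht
    · -- the occurrence straddles the boundary: pre ends with s.take k
      rw [not_le] at h2
      refine Or.inr (Or.inr ⟨pre.length - u.length, by omega, by omega, u, ?_⟩)
      rw [List.length_append, ← Nat.sub_sub] at ht
      have hz : pre.length - u.length - s.length = 0 := by omega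
      rw [hz, List.take_zero, List.append_nil] at ht
      exact ht

-- bridging: B's viable clause holds iff one of the three shapes above holds
theorem viableCheck_iff (p s : List Char) :
    viableCheck p s = true ↔
      s <:+: p ∨ (∀ ch ∈ s, ch ∉ p) ∨
        (∃ k : Nat, 1 ≤ k ∧ k < s.length ∧ s.take k <:+ p) := by
  have e1 : (PySem.Chars.isIn s p = true) ↔ s <:+: p := PySem.Chars.isIn_iff_infix _ _
  have e2 : ((s.all fun c => !PySem.Chars.isIn [c] p) = true) ↔ ∀ ch ∈ s, ch ∉ p := by
    simp [List.all_eq_true, PySem.Chars.isIn_eq_false_iff,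
      List.singleton_infix_iff]
  have e3 : (((PySem.List.pyRange 1 (PySem.Chars.len s) 1).any fun k =>
        PySem.Chars.endswith p (PySem.Chars.slice s none (some k))) = true)
      ↔ ∃ k : Nat, 1 ≤ k ∧ k < s.length ∧ s.take k <:+ p := by
    rw [List.any_eq_true]
    constructor
    · rintro ⟨k, hk, he⟩
      rw [PySem.List.mem_pyRange_one] at hk
      rw [PySem.Chars.len_eq] at hk
      refine ⟨k.toNat, by omega, by omega, ?_⟩
      rw [PySem.Chars.endswith_iff, PySem.Chars.slice_eq_listSlice,
        PySem.List.slice_to s (show (0:Int) ≤ k by omega)] at he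
      exact he
    · rintro ⟨k, hk1, hk2, hs⟩
      refine ⟨(k : Int), ?_, ?_⟩
      · rw [PySem.List.mem_pyRange_one, PySem.Chars.len_eq]; omega
      · rw [PySem.Chars.endswith_iff, PySem.Chars.slice_eq_listSlice,
          PySem.List.slice_to s (show (0:Int) ≤ (k:Int) by omega), Int.toNat_natCast]
        exact hs
  unfold viableCheck
  rw [Bool.or_eq_true, Bool.or_eq_true, or_assoc]
  exact or_congr e1 (or_congr e2 e3)

-- pruning is sound: if every string fits into pre ++ c, pre was viable
theorem viable_of_pred (strings : List String) (pre c : List Char)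
    (hnd : (pre ++ c).Nodup) (h : predP strings (pre ++ c) = true) :
    viableB strings pre = true := by
  unfold viableB
  rw [List.all_eq_true]
  intro s hs
  rw [viableCheck_iff]
  refine infix_split pre c s.toList hnd ?_
  rw [predP, List.all_eq_true] at h
  exact (PySem.Chars.isIn_iff_infix _ _).mp (h s hs)

-- findSome? only depends on the values on members
theorem findSome?_congr_mem {α β : Type} (l : List α) (f g : α → Option β)
    (h : ∀ x ∈ l, f x = g x) : l.findSome? f = l.findSome? g := by
  induction l with
  | nil => rfl
  | cons a t ih =>
    rw [List.findSome?_cons, List.findSome?_cons, h a (List.mem_cons_self ..)]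
    cases g a with
    | some b => rfl
    | none => exact ih (fun x hx => h x (List.mem_cons_of_mem _ hx))

-- the DFS visits exactly the permutations A scans, in the same order, and returns
-- the first one satisfying predP (soundness of pruning + identical enumeration order)
theorem dfsB_eq (strings : List String) :
    ∀ (fuel : Nat) (remaining pre : List Char), fuel = remaining.length →
      (pre ++ remaining).Nodup →
      dfsB strings fuel pre remaining =
        (PySem.List.permutations remaining fuel).findSome?
          (fun c => if predP strings (pre ++ c) then some (pre ++ c) else none) := by
  intro fuel
  induction fuel with
  | zero =>
    intro remaining pre hlen hnd
    have hr : remaining = [] := List.eq_nil_iff_length_eq_zero.mpr hlen.symm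
    subst hr
    rw [dfsB]
    show _ = List.findSome? _ [[]]
    rw [List.findSome?_cons]
    cases hv : viableB strings pre with
    | true =>
      simp only [if_true]
      unfold predP
      cases hp : strings.all (fun s => PySem.Chars.isIn s.toList pre) <;>
        simp [hp, List.findSome?_nil]
    | false =>
      have hp : predP strings (pre ++ []) = false := by
        cases hpp : predP strings (pre ++ []) with
        | false => rfl
        | true => exact absurd (viable_of_pred strings pre [] hnd hpp) (by simp [hv])
      rw [List.append_nil] at hp
      simp [hp]
  | succ fuel' ih =>
    intro remaining pre hlen hnd
    cases remaining with
    | nil => exact absurd hlen (by simp)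
    | cons a t =>
      rw [dfsB]
      cases hv : viableB strings pre with
      | false =>
        simp only [Bool.false_eq_true, if_false]
        symm
        rw [List.findSome?_eq_none_iff]
        intro c hc
        rw [hlen] at hc
        have hperm : c.Perm (a :: t) := PySem.List.perm_of_mem_permutations hc
        have hnd2 : (pre ++ c).Nodup :=
          ((List.Perm.append_left pre hperm.symm).nodup_iff).mp hnd
        have hp : predP strings (pre ++ c) = false := by
          cases hpp : predP strings (pre ++ c) with
          | false => rfl
          | true => exact absurd (viable_of_pred strings pre c hnd2 hpp) (by simp [hv])
        simp [hp]
      | true =>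
        simp only [if_true]
        conv_rhs => rw [PySem.List.permutations]
        rw [findSome?_flatMap]
        refine findSome?_congr_mem _ _ _ (fun i hi => ?_)
        rw [List.mem_range] at hi
        have hsome : (a :: t)[i]? = some (a :: t)[i] := List.getElem?_eq_getElem hi
        simp only [hsome]
        rw [List.findSome?_map]
        have hfl : fuel' = ((a :: t).eraseIdx i).length := by
          rw [List.length_eraseIdx_of_lt hi]
          omega
        have hnd2 : ((pre ++ [(a :: t)[i]]) ++ (a :: t).eraseIdx i).Nodup := by
          have hpm : ((pre ++ [(a :: t)[i]]) ++ (a :: t).eraseIdx i).Perm (pre ++ (a :: t)) := by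
            rw [List.append_assoc, List.singleton_append]
            exact List.Perm.append_left pre (List.getElem_cons_eraseIdx_perm hi)
          exact hpm.nodup_iff.mpr hnd
        rw [ih _ _ hfl hnd2]
        refine findSome?_congr_mem _ _ _ (fun p _ => ?_)
        simp [List.append_assoc]

-- ===== VERDICT (by name: the statement is the Claim_ definition above) =====
theorem superstring_spec : Claim_equal_superstring := by
  intro strings _
  show superstring strings = superstring_alt strings
  simp only [superstring, superstring_alt]
  rw [lista_eq_dedup]
  have hnd : (([] : List Char) ++ PySem.List.dedup (strings.flatMap (fun w => w.toList))).Nodup := by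
    simp only [List.nil_append]
    exact PySem.List.nodup_dedup _
  rw [scan_eq_find, dfsB_eq strings _ _ [] rfl hnd]
  simp only [List.nil_append]
  rw [findSome?_guard]
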